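-- pv_equiv track=rewrite | github.com/ALazenka/LocalHackDay-Project | backend/src/algorithm.py | find_most_alike
-- ===== SOURCE A (Python) =====
-- def find_most_alike(d, val):
-- 	'''most alike and most slices'''
-- 	toppings = list(d.keys())
--
-- 	toppings.remove(val)
--
-- 	result = {}
--
-- 	for x in toppings:
-- 		result[x] = 0
--
-- 	#most unique&picky
-- 	for t in toppings:
-- 		if val == t:
-- 			continue
-- 		for i in range(len(val)):
-- 				if val[i] == t[i]:
-- 					result[t] += 1
--
-- 	if len(result.values()) == 0:
-- 		return None
-- 	highest_matches = max(result.values())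
--
-- 	lowest_slices = (0, 99999999999999999999999999)
--
-- 	#lowest num of slices
-- 	for i in result.keys():
-- 		if result[i] == highest_matches and d[i] < lowest_slices[1]:
-- 			lowest_slices = (i, d[i])
--
-- 	return lowest_slices[0]
-- ===== SOURCE B (Python) =====
-- def find_most_alike(d, val):
-- 	'''most alike and most slices'''
-- 	counts = {t: 0 for t in d if t != val}
-- 	if not counts:
-- 		return None
-- 	for i in range(len(val)):
-- 		c = val[i]
-- 		for t in counts:
-- 			if t[i] == c:
-- 				counts[t] += 1
-- 	order = sorted(counts, key=lambda t: (-counts[t], d[t]))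
-- 	return order[0]
-- ===== Notes on version B (the rewrite author's own statement) =====
-- stated objective: alternative
-- what changed: B counts matches column-wise (one pass over positions incrementing every candidate whose character matches, transposing A's per-candidate scans) and then picks the winner by a single stable sort on the key (-matches, slices) taking the first element, instead of A's zero-init loop, per-topping counting loop, max() scan and sentinel-pair selection scan.
import Mathlib
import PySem

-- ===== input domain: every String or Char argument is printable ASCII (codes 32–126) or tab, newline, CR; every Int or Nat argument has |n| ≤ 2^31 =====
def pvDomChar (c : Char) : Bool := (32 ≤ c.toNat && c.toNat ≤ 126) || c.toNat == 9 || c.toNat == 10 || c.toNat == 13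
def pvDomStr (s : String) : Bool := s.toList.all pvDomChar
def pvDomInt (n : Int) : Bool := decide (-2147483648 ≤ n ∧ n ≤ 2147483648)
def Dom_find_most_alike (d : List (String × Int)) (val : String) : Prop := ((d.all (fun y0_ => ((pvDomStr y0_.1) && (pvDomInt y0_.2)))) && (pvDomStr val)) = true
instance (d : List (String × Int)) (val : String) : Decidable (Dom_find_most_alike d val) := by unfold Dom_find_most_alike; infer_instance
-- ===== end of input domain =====

-- B re-implements A with a transposed count (one pass over the positions of val,
-- incrementing every candidate whose character matches there) and picks the winner
-- as the head of one stable sort by (-matches, slices), replacing A's per-candidate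
-- counting loops, max() scan and sentinel-pair selection scan.

-- ===== PORT A =====
def find_most_alike (d : List (String × Int)) (val : String) : Option String :=
  let dd := PySem.Dict.ofList d
  let toppings0 := dd.keys
  match PySem.List.remove? toppings0 val with
  | none => none          -- list.remove raises ValueError here; excluded by Pre_
  | some toppings =>
    let result0 : PySem.Dict String Int :=
      toppings.foldl (fun r x => r.insert x 0) PySem.Dict.empty
    let result : PySem.Dict String Int :=
      toppings.foldl (fun r t =>
        if val == t then r
        else (PySem.List.pyRange 0 (PySem.Str.len val) 1).foldl (fun r i =>
          match PySem.Str.pyGet? val i, PySem.Str.pyGet? t i with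
          | some a, some b => if a == b then r.modify t 0 (· + 1) else r
          | _, _ => r     -- an out-of-range index raises IndexError; excluded by Pre_
          ) r) result0
    match PySem.List.max? result.values (fun v => v) with
    | none => none        -- len(result.values()) == 0
    | some highest =>
      -- sentinel pair (0, 99999999999999999999999999): the int 0 first component is
      -- ported as none; it survives only when every candidate's d-value ≥ 10^26,
      -- which Dom (|int| ≤ 2^31) makes unreachable (Python would return the int 0 there).
      (result.keys.foldl (fun ls i =>
          if result.getD i 0 = highest ∧ dd.getD i 0 < ls.2 then (some i, dd.getD i 0) else ls)
        ((none : Option String), (99999999999999999999999999 : Int))).1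

-- ===== PORT B =====
def find_most_alike_alt (d : List (String × Int)) (val : String) : Option String :=
  let dd := PySem.Dict.ofList d
  -- counts = {t: 0 for t in d if t != val}
  let counts0 : PySem.Dict String Int :=
    (dd.keys.filter (fun t => t != val)).foldl (fun c t => c.insert t 0) PySem.Dict.empty
  if counts0.keys.isEmpty then none    -- 'if not counts: return None'
  else
    -- for i in range(len(val)): c = val[i]; for t in counts: if t[i] == c: counts[t] += 1
    let counts : PySem.Dict String Int :=
      (PySem.List.pyRange 0 (PySem.Str.len val) 1).foldl (fun c i =>
        match PySem.Str.pyGet? val i with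
        | none => c                    -- unreachable: i ranges over range(len(val))
        | some ch => c.keys.foldl (fun c' t =>
            match PySem.Str.pyGet? t i with
            | none => c'               -- t[i] raises IndexError; excluded by Pre_
            | some a => if a == ch then c'.modify t 0 (· + 1) else c') c) counts0
    -- order = sorted(counts, key=lambda t: (-counts[t], d[t])); return order[0]
    let order := PySem.List.sorted2 counts.keys
      (fun t => -(counts.getD t 0)) (fun t => dd.getD t 0)
    PySem.List.pyGet? order 0

-- ===== PRECONDITION & SPEC =====
-- Pre_ = exactly the inputs where A returns: val must be a key (else list.remove raises
-- ValueError) and no key may be shorter than val (else t[i] raises IndexError).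
def Pre_find_most_alike (d : List (String × Int)) (val : String) : Prop :=
  val ∈ d.map Prod.fst ∧ ∀ p ∈ d, PySem.Str.len val ≤ PySem.Str.len p.1
instance (d : List (String × Int)) (val : String) : Decidable (Pre_find_most_alike d val) := by
  unfold Pre_find_most_alike; infer_instance
def pvWitness_find_most_alike : (List (String × Int)) × String :=
  ([("ab", 3), ("ax", 1), ("zz", 2)], "ab")

def Spec_find_most_alike (d : List (String × Int)) (val : String) (out : Option String) : Prop := out = find_most_alike_alt d val
instance (d : List (String × Int)) (val : String) (out : Option String) : Decidable (Spec_find_most_alike d val out) := by unfold Spec_find_most_alike; infer_instance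

-- ===== CLAIM (what is proved, stated in full; the proofs are below) =====
def Claim_equal_find_most_alike : Prop := ∀ (d : List (String × Int)) (val : String), Dom_find_most_alike d val → Pre_find_most_alike d val → Spec_find_most_alike d val (find_most_alike d val)

-- ===== LEMMAS AND PROOFS =====

-- A's (and B's) per-index character test, as a Bool predicate
def condA (val t : String) (i : Int) : Bool :=
  match PySem.Str.pyGet? val i, PySem.Str.pyGet? t i with
  | some a, some b => a == b
  | _, _ => false

-- the number of position matches, as both programs end up computing it
def mcount (val t : String) : Int :=
  ((PySem.List.pyRange 0 (PySem.Str.len val) 1).countP (condA val t) : Int)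

def selStep (f g : String → Int) (m x : String) : String :=
  if (decide (f m < f x) || (!decide (f x < f m) && decide (-(g m) < -(g x)))) then x else m

theorem selStep_cases (f g : String → Int) (m x : String) :
    selStep f g m x = m ∨ selStep f g m x = x := by
  unfold selStep; split
  · right; rfl
  · left; rfl

theorem selStep_le (f g : String → Int) (m x : String) :
    f m ≤ f (selStep f g m x) ∧ f x ≤ f (selStep f g m x) := by
  unfold selStep; split
  · rename_i h
    simp only [Bool.or_eq_true, Bool.and_eq_true, Bool.not_eq_true', decide_eq_true_eq,
      decide_eq_false_iff_not] at h
    rcases h with h | ⟨h, _⟩ <;> exact ⟨by omega, le_refl _⟩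
  · rename_i h
    simp only [Bool.or_eq_true, Bool.and_eq_true, Bool.not_eq_true', decide_eq_true_eq,
      decide_eq_false_iff_not, not_or] at h
    exact ⟨le_refl _, by omega⟩

theorem selStep_mem (f g : String → Int) :
    ∀ (l : List String) (m : String), l.foldl (selStep f g) m ∈ m :: l := by
  intro l
  induction l with
  | nil => intro m; simp
  | cons x t ih =>
    intro m
    simp only [List.foldl_cons]
    rcases List.mem_cons.mp (ih (selStep f g m x)) with h | h
    · rcases selStep_cases f g m x with hc | hc
      · rw [h, hc]; simp
      · rw [h, hc]; simp
    · simp [List.mem_cons]; tauto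

theorem selStep_isMax (f g : String → Int) :
    ∀ (l : List String) (m : String), ∀ x ∈ m :: l, f x ≤ f (l.foldl (selStep f g) m) := by
  intro l
  induction l with
  | nil => intro m x hx; simp at hx; simp [hx]
  | cons y t ih =>
    intro m x hx
    simp only [List.foldl_cons]
    rcases List.mem_cons.mp hx with rfl | hx'
    · exact le_trans (selStep_le f g x y).1 (ih (selStep f g x y) _ (by simp))
    · rcases List.mem_cons.mp hx' with rfl | hx''
      · exact le_trans (selStep_le f g m x).2 (ih (selStep f g m x) _ (by simp))
      · exact ih (selStep f g m y) x (by simp [hx''])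

theorem sel_inv (f g : String → Int) (M B : Int) :
    ∀ (l : List String) (m : String) (o : Option String) (b : Int),
      (∀ x ∈ l, f x ≤ M ∧ g x < B) → f m ≤ M →
      (f m = M → o = some m ∧ b = g m) → (f m ≠ M → o = none ∧ b = B) →
      (l.foldl (fun ls i => if f i = M ∧ g i < ls.2 then (some i, g i) else ls) (o, b)).1
        = (if f (l.foldl (selStep f g) m) = M then some (l.foldl (selStep f g) m) else none) := by
  intro l
  induction l with
  | nil =>
    intro m o b _ _ h1 h2
    by_cases hm : f m = M
    · simp [List.foldl_nil, (h1 hm).1, hm]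
    · simp [List.foldl_nil, (h2 hm).1, hm]
  | cons x t ih =>
    intro m o b hl hm h1 h2
    have hx := hl x (by simp)
    simp only [List.foldl_cons]
    by_cases hfx : f x = M
    · by_cases hfm : f m = M
      · obtain ⟨ho, hb⟩ := h1 hfm
        subst ho hb
        by_cases hgx : g x < g m
        · rw [if_pos ⟨hfx, hgx⟩]
          have hsel : selStep f g m x = x := by
            unfold selStep
            rw [if_pos]
            simp only [Bool.or_eq_true, Bool.and_eq_true, Bool.not_eq_true',
              decide_eq_true_eq, decide_eq_false_iff_not]
            right; constructor <;> omega
          rw [hsel]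
          exact ih x (some x) (g x) (fun y hy => hl y (by simp [hy])) (le_of_eq hfx)
            (fun _ => ⟨rfl, rfl⟩) (fun h => absurd hfx h)
        · rw [if_neg (by rintro ⟨_, h⟩; exact hgx h)]
          have hsel : selStep f g m x = m := by
            unfold selStep
            rw [if_neg]
            simp only [Bool.or_eq_true, Bool.and_eq_true, Bool.not_eq_true',
              decide_eq_true_eq, decide_eq_false_iff_not, not_or, not_and]
            constructor
            · omega
            · intro _; omega
          rw [hsel]
          exact ih m (some m) (g m) (fun y hy => hl y (by simp [hy])) hm h1 h2
      · obtain ⟨ho, hb⟩ := h2 hfm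
        subst ho hb
        rw [if_pos ⟨hfx, hx.2⟩]
        have hsel : selStep f g m x = x := by
          unfold selStep
          rw [if_pos]
          simp only [Bool.or_eq_true, decide_eq_true_eq]
          left; omega
        rw [hsel]
        exact ih x (some x) (g x) (fun y hy => hl y (by simp [hy])) (le_of_eq hfx)
          (fun _ => ⟨rfl, rfl⟩) (fun h => absurd hfx h)
    · have hAcond : ¬ (f x = M ∧ g x < b) := by rintro ⟨h, _⟩; exact hfx h
      rw [if_neg hAcond]
      rcases selStep_cases f g m x with hc | hc
      · rw [hc]; exact ih m o b (fun y hy => hl y (by simp [hy])) hm h1 h2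
      · rw [hc]
        by_cases hfm : f m = M
        · exfalso
          have : selStep f g m x = m := by
            unfold selStep
            rw [if_neg]
            simp only [Bool.or_eq_true, Bool.and_eq_true, Bool.not_eq_true',
              decide_eq_true_eq, decide_eq_false_iff_not, not_or, not_and]
            constructor
            · omega
            · intro h; exfalso; exact h (by omega)
          have hmx : m = x := by rw [← this, hc]
          exact hfx (hmx ▸ hfm)
        · obtain ⟨ho, hb⟩ := h2 hfm
          rw [ho, hb]
          exact ih x none B (fun y hy => hl y (by simp [hy])) hx.1
            (fun h => absurd h hfx) (fun _ => ⟨rfl, rfl⟩)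

theorem get?_foldl_insert_mem (ps : List (String × Int)) :
    ∀ (dd : PySem.Dict String Int) (k : String) (v : Int),
      (ps.foldl (fun d p => d.insert p.1 p.2) dd).get? k = some v → (k, v) ∈ ps ∨ dd.get? k = some v := by
  induction ps with
  | nil => intro dd k v h; right; exact h
  | cons p t ih =>
    intro dd k v h
    simp only [List.foldl_cons] at h
    rcases ih (dd.insert p.1 p.2) k v h with h' | h'
    · left; simp [h']
    · rw [PySem.Dict.get?_insert] at h'
      split at h'
      · left
        rename_i he
        obtain ⟨a, bv⟩ := p
        simp only [Option.some.injEq] at h'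
        subst h'
        simp only at he
        subst he
        exact List.mem_cons_self
      · right; exact h'

theorem keys_ofList_eq (d : List (String × Int)) :
    (PySem.Dict.ofList d).keys = PySem.Set.ofList (d.map Prod.fst) := by
  show (d.foldl (fun acc p => acc.insert p.1 p.2) PySem.Dict.empty).keys = _
  rw [PySem.Dict.keys_foldl_insert_key d Prod.fst (fun d x => x.2)]
  simp [PySem.Set.update_nil_left]

theorem getD_ofList_bound (d : List (String × Int))
    (hDom : ∀ p ∈ d, pvDomInt p.2 = true) (k : String) :
    (PySem.Dict.ofList d).getD k 0 < 99999999999999999999999999 := by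
  rw [PySem.Dict.getD_eq_get?_getD]
  cases hg : (PySem.Dict.ofList d).get? k with
  | none => simp
  | some v =>
    have := get?_foldl_insert_mem d PySem.Dict.empty k v hg
    rcases this with h | h
    · have := hDom _ h
      simp only [pvDomInt, decide_eq_true_eq] at this
      simp; omega
    · simp [PySem.Dict.get?_empty] at h

theorem pyGet?_val_isSome (s : String) (i : Int) (h0 : 0 ≤ i) (h1 : i < PySem.Str.len s) :
    ∃ c, PySem.Str.pyGet? s i = some c := by
  unfold PySem.Str.len at h1
  refine ⟨s.toList[i.toNat]'(by omega), ?_⟩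
  simp only [PySem.Str.pyGet?, PySem.Chars.pyGet?, PySem.List.pyGet?, PySem.List.pyIdx?]
  rw [if_pos h0, if_pos (by omega)]
  simp [List.getElem?_eq_getElem (by omega : i.toNat < s.toList.length)]

theorem getD_init (ts : List String) :
    ∀ (r : PySem.Dict String Int) (k : String),
      (ts.foldl (fun r x => r.insert x 0) r).getD k 0 = if k ∈ ts then 0 else r.getD k 0 := by
  induction ts with
  | nil => intro r k; simp
  | cons x t ih =>
    intro r k
    simp only [List.foldl_cons, ih, PySem.Dict.getD_insert]
    by_cases hk : k ∈ t
    · simp [hk]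
    · by_cases hx : k = x <;> simp [hk, hx]

-- ---------- A-side counting ----------

theorem inner_body_eq (val t : String) :
    ∀ (r : PySem.Dict String Int), ∀ i,
      (match PySem.Str.pyGet? val i, PySem.Str.pyGet? t i with
        | some a, some b => if a == b then r.modify t 0 (· + 1) else r
        | _, _ => r)
      = if condA val t i then r.modify t 0 (· + 1) else r := by
  intro r i
  unfold condA
  cases PySem.Str.pyGet? val i with
  | none => simp
  | some a =>
    cases PySem.Str.pyGet? t i with
    | none => simp
    | some b => by_cases h : a == b <;> simp [h]

theorem inner_as_replicate (val t : String) (r : PySem.Dict String Int) :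
    (PySem.List.pyRange 0 (PySem.Str.len val) 1).foldl (fun r i =>
        match PySem.Str.pyGet? val i, PySem.Str.pyGet? t i with
        | some a, some b => if a == b then r.modify t 0 (· + 1) else r
        | _, _ => r) r
      = (List.replicate ((PySem.List.pyRange 0 (PySem.Str.len val) 1).countP (condA val t)) t).foldl
          (fun d x => d.modify x 0 (· + 1)) r := by
  rw [PySem.List.foldl_congr_mem _ _ (fun r i => if condA val t i then r.modify t 0 (· + 1) else r) _
    (fun acc x _ => inner_body_eq val t acc x)]
  have h2 : List.foldl (fun r i => if condA val t i = true then r.modify t 0 (· + 1) else r) r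
      (PySem.List.pyRange 0 (PySem.Str.len val) 1)
      = List.foldl (fun r _ => r.modify t 0 (· + 1)) r
        ((PySem.List.pyRange 0 (PySem.Str.len val) 1).filter (condA val t)) :=
    PySem.List.foldl_if_eq_foldl_filter (condA val t) (fun r _ => r.modify t 0 (· + 1)) _ r
  rw [h2]
  have h3 : List.foldl (fun r _ => r.modify t 0 (· + 1)) r
      ((PySem.List.pyRange 0 (PySem.Str.len val) 1).filter (condA val t))
      = List.foldl (fun d x => d.modify x 0 (· + 1)) r
        (List.map (fun _ => t) ((PySem.List.pyRange 0 (PySem.Str.len val) 1).filter (condA val t))) :=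
    by rw [List.foldl_map]
  rw [h3]
  rw [show (List.map (fun _ => t) ((PySem.List.pyRange 0 (PySem.Str.len val) 1).filter (condA val t)))
      = List.replicate ((PySem.List.pyRange 0 (PySem.Str.len val) 1).countP (condA val t)) t from by
    rw [List.map_const', ← List.countP_eq_length_filter]]

theorem getD_inner (val t : String) (r : PySem.Dict String Int) (k : String) :
    ((PySem.List.pyRange 0 (PySem.Str.len val) 1).foldl (fun r i =>
        match PySem.Str.pyGet? val i, PySem.Str.pyGet? t i with
        | some a, some b => if a == b then r.modify t 0 (· + 1) else r
        | _, _ => r) r).getD k 0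
      = r.getD k 0 + if k = t then mcount val t else 0 := by
  rw [inner_as_replicate, PySem.Dict.getD_foldl_modify_add_one]
  unfold mcount
  congr 1
  rw [List.count_replicate]
  by_cases h : k = t
  · simp [h]
  · simp [h, Ne.symm h]

theorem keys_inner (val t : String) (r : PySem.Dict String Int) (ht : t ∈ r.keys) :
    ((PySem.List.pyRange 0 (PySem.Str.len val) 1).foldl (fun r i =>
        match PySem.Str.pyGet? val i, PySem.Str.pyGet? t i with
        | some a, some b => if a == b then r.modify t 0 (· + 1) else r
        | _, _ => r) r).keys = r.keys := by
  rw [inner_as_replicate]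
  have h4 := PySem.Dict.keys_foldl_modify
    (List.replicate ((PySem.List.pyRange 0 (PySem.Str.len val) 1).countP (condA val t)) t)
    (0 : Int) (fun _ _ => (· + 1)) r
  rw [h4]
  rw [PySem.Set.update_eq_append_filter]
  rw [show (List.filter (fun y => !PySem.Set.contains r.keys y)
      (PySem.Set.ofList (List.replicate ((PySem.List.pyRange 0 (PySem.Str.len val) 1).countP (condA val t)) t))) = [] from ?_]
  · simp
  · rw [List.filter_eq_nil_iff]
    intro y hy
    have : y ∈ List.replicate ((PySem.List.pyRange 0 (PySem.Str.len val) 1).countP (condA val t)) t :=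
      (PySem.Set.mem_ofList _ y).mp hy
    have hyt : y = t := (List.eq_of_mem_replicate this)
    subst hyt
    simp [ht]

theorem getD_outer (val : String) :
    ∀ (ts : List String), ts.Nodup → val ∉ ts →
      ∀ (r : PySem.Dict String Int) (k : String),
        (ts.foldl (fun r t =>
            if val == t then r
            else (PySem.List.pyRange 0 (PySem.Str.len val) 1).foldl (fun r i =>
              match PySem.Str.pyGet? val i, PySem.Str.pyGet? t i with
              | some a, some b => if a == b then r.modify t 0 (· + 1) else r
              | _, _ => r) r) r).getD k 0
          = r.getD k 0 + if k ∈ ts then mcount val k else 0 := by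
  intro ts
  induction ts with
  | nil => intro _ _ r k; simp
  | cons t ts ih =>
    intro hnd hval r k
    have hvt : (val == t) = false := by
      simp only [beq_eq_false_iff_ne, ne_eq]
      intro h; exact hval (by simp [h])
    simp only [List.foldl_cons, hvt, Bool.false_eq_true, if_false]
    rw [ih (by simp_all [List.nodup_cons]) (fun h => hval (by simp [h]))]
    rw [getD_inner]
    by_cases hk : k ∈ ts
    · have hkt : k ≠ t := by
        intro h; subst h
        exact (List.nodup_cons.mp hnd).1 hk
      simp [hk, hkt]
    · by_cases hkt : k = t
      · subst hkt
        simp [hk]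
      · simp [hk, hkt]

theorem keys_outer (val : String) :
    ∀ (ts : List String) (r : PySem.Dict String Int), (∀ t ∈ ts, t ∈ r.keys) →
      (ts.foldl (fun r t =>
          if val == t then r
          else (PySem.List.pyRange 0 (PySem.Str.len val) 1).foldl (fun r i =>
            match PySem.Str.pyGet? val i, PySem.Str.pyGet? t i with
            | some a, some b => if a == b then r.modify t 0 (· + 1) else r
            | _, _ => r) r) r).keys = r.keys := by
  intro ts
  induction ts with
  | nil => intro r _; simp
  | cons t ts ih =>
    intro r hmem
    simp only [List.foldl_cons]
    by_cases hvt : (val == t)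
    · rw [if_pos hvt]
      exact ih r (fun x hx => hmem x (by simp [hx]))
    · rw [if_neg hvt]
      have hk := keys_inner val t r (hmem t (by simp))
      rw [ih _ (fun x hx => by rw [hk]; exact hmem x (by simp [hx])), hk]

-- ---------- B-side column-wise counting ----------

theorem colInner_eq_filter_modify (val : String) (i : Int) (ch : Char)
    (hch : PySem.Str.pyGet? val i = some ch) (K : List String) (c : PySem.Dict String Int) :
    K.foldl (fun c' t =>
        match PySem.Str.pyGet? t i with
        | none => c'
        | some a => if a == ch then c'.modify t 0 (· + 1) else c') c
      = (K.filter (fun t => condA val t i)).foldl (fun c' t => c'.modify t 0 (· + 1)) c := by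
  rw [← PySem.List.foldl_if_eq_foldl_filter (fun t => condA val t i)
      (fun c' t => c'.modify t 0 (· + 1)) K c]
  apply PySem.List.foldl_congr_mem
  intro acc t _
  unfold condA
  rw [hch]
  cases PySem.Str.pyGet? t i with
  | none => simp
  | some a =>
    by_cases h : a = ch
    · subst h; simp
    · simp [h, Ne.symm h]

theorem colInner_keys (c : PySem.Dict String Int) (l : List String) (hl : ∀ t ∈ l, t ∈ c.keys) :
    (l.foldl (fun c' t => c'.modify t 0 (· + 1)) c).keys = c.keys := by
  rw [PySem.Dict.keys_foldl_modify l (0 : Int) (fun _ _ => (· + 1)) c]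
  rw [PySem.Set.update_eq_append_filter]
  rw [show (List.filter (fun y => !PySem.Set.contains c.keys y) (PySem.Set.ofList l)) = [] from ?_]
  · simp
  · rw [List.filter_eq_nil_iff]
    intro y hy
    have : y ∈ l := (PySem.Set.mem_ofList _ y).mp hy
    simp [hl y this]

theorem colInner_getD (l : List String) (c : PySem.Dict String Int) (k : String) :
    (l.foldl (fun c' t => c'.modify t 0 (· + 1)) c).getD k 0
      = c.getD k 0 + (l.count k : Int) := by
  rw [PySem.Dict.getD_foldl_modify_add_one]

theorem count_filter_nodup (K : List String) (hnd : K.Nodup) (p : String → Bool) (k : String) :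
    ((K.filter p).count k : Int) = if k ∈ K ∧ p k then 1 else 0 := by
  by_cases hk : k ∈ K ∧ p k
  · have hmem : k ∈ K.filter p := List.mem_filter.mpr ⟨hk.1, hk.2⟩
    have hnd' : (K.filter p).Nodup := hnd.filter p
    rw [List.count_eq_one_of_mem hnd' hmem]
    simp [hk]
  · have : k ∉ K.filter p := by
      intro hmem
      exact hk ⟨(List.mem_filter.mp hmem).1, (List.mem_filter.mp hmem).2⟩
    rw [List.count_eq_zero_of_not_mem this]
    simp [hk]

theorem colLoop_spec (val : String) :
    ∀ (l : List Int), (∀ i ∈ l, 0 ≤ i ∧ i < PySem.Str.len val) →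
      ∀ (c : PySem.Dict String Int), c.keys.Nodup →
      (l.foldl (fun c i =>
          match PySem.Str.pyGet? val i with
          | none => c
          | some ch => c.keys.foldl (fun c' t =>
              match PySem.Str.pyGet? t i with
              | none => c'
              | some a => if a == ch then c'.modify t 0 (· + 1) else c') c) c).keys = c.keys
      ∧ ∀ k, (l.foldl (fun c i =>
          match PySem.Str.pyGet? val i with
          | none => c
          | some ch => c.keys.foldl (fun c' t =>
              match PySem.Str.pyGet? t i with
              | none => c'
              | some a => if a == ch then c'.modify t 0 (· + 1) else c') c) c).getD k 0
        = c.getD k 0 + if k ∈ c.keys then (l.countP (condA val k) : Int) else 0 := by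
  intro l
  induction l with
  | nil => intro _ c _; refine ⟨rfl, fun k => by simp⟩
  | cons i l ih =>
    intro hl c hnd
    obtain ⟨ch, hch⟩ := pyGet?_val_isSome val i (hl i (by simp)).1 (hl i (by simp)).2
    simp only [List.foldl_cons, hch]
    rw [colInner_eq_filter_modify val i ch hch c.keys c]
    have hkeys1 : ((c.keys.filter (fun t => condA val t i)).foldl
        (fun c' t => c'.modify t 0 (· + 1)) c).keys = c.keys := by
      apply colInner_keys c
      intro t ht
      exact (List.mem_filter.mp ht).1
    have hnd1 : ((c.keys.filter (fun t => condA val t i)).foldl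
        (fun c' t => c'.modify t 0 (· + 1)) c).keys.Nodup := by rw [hkeys1]; exact hnd
    obtain ⟨ihk, ihg⟩ := ih (fun j hj => hl j (by simp [hj])) _ hnd1
    refine ⟨by rw [ihk, hkeys1], fun k => ?_⟩
    rw [ihg k, hkeys1, colInner_getD, count_filter_nodup c.keys hnd (fun t => condA val t i) k]
    by_cases hk : k ∈ c.keys
    · by_cases hc : condA val k i = true <;>
        simp only [hk, hc, List.countP_cons, if_false, and_true, and_false,
          Bool.false_eq_true, if_pos] <;>
        push_cast <;> omega
    · simp [hk]

-- ---------- B-side selection: head of the stable sort ----------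

theorem head?_insertBy (before : String → String → Bool) (x : String) (acc : List String) :
    (PySem.List.insertBy before x acc).head?
      = some (match acc with | [] => x | y :: _ => if before x y then x else y) := by
  cases acc with
  | nil => rfl
  | cons y ys =>
    simp only [PySem.List.insertBy]
    by_cases h : before x y <;> simp [h]

theorem head?_foldl_insertBy (before : String → String → Bool) :
    ∀ (l : List String) (y : String) (ys : List String),
      (l.foldl (fun acc x => PySem.List.insertBy before x acc) (y :: ys)).head?
        = some (l.foldl (fun m x => if before x m then x else m) y) := by
  intro l
  induction l with
  | nil => intro y ys; rfl
  | cons x t ih =>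
    intro y ys
    simp only [List.foldl_cons]
    cases hins : PySem.List.insertBy before x (y :: ys) with
    | nil =>
      exfalso
      have hh := head?_insertBy before x (y :: ys)
      rw [hins] at hh
      simp at hh
    | cons z zs =>
      have hz : z = if before x y then x else y := by
        have := head?_insertBy before x (y :: ys)
        rw [hins] at this
        simpa using this
      rw [ih z zs, hz]

theorem pickFold_congr (before before' : String → String → Bool) (s : List String)
    (h : ∀ a ∈ s, ∀ b ∈ s, before a b = before' a b) :
    ∀ (t : List String), (∀ x ∈ t, x ∈ s) → ∀ (m : String), m ∈ s →
      t.foldl (fun m x => if before x m then x else m) m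
        = t.foldl (fun m x => if before' x m then x else m) m := by
  intro t
  induction t with
  | nil => intro _ m _; rfl
  | cons x t ih =>
    intro ht m hm
    simp only [List.foldl_cons]
    rw [h x (ht x (by simp)) m hm]
    by_cases hb : before' x m = true
    · rw [hb]; simp only [if_true]
      exact ih (fun y hy => ht y (by simp [hy])) x (ht x (by simp))
    · rw [Bool.eq_false_iff.mpr hb]; simp only [Bool.false_eq_true, if_false]
      exact ih (fun y hy => ht y (by simp [hy])) m hm

theorem pickFold_eq_selStep (f g : String → Int) :
    ∀ (t : List String) (m : String),
      t.foldl (fun m x => if (decide (-(f x) < -(f m)) || (!decide (-(f m) < -(f x)) && decide (g x < g m))) then x else m) m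
        = t.foldl (selStep f g) m := by
  intro t
  induction t with
  | nil => intro m; rfl
  | cons x t ih =>
    intro m
    simp only [List.foldl_cons]
    have e1 : decide (-(f x) < -(f m)) = decide (f m < f x) := by rw [decide_eq_decide]; omega
    have e2 : decide (-(f m) < -(f x)) = decide (f x < f m) := by rw [decide_eq_decide]; omega
    have e3 : decide (g x < g m) = decide (-(g m) < -(g x)) := by rw [decide_eq_decide]; omega
    have hstep : (if (decide (-(f x) < -(f m)) || (!decide (-(f m) < -(f x)) && decide (g x < g m))) then x else m)
        = selStep f g m x := by
      unfold selStep
      rw [e1, e2, e3]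
    rw [hstep, ih]

-- A's final selection scan returns the selStep fold (given the max and the bound)
theorem final_step (h : String) (t : List String) (f g : String → Int) (B highest : Int)
    (hgb : ∀ x, g x < B)
    (hmax : PySem.List.max? ((h :: t).map f) (fun v => v) = some highest) :
    ((h :: t).foldl (fun ls i => if f i = highest ∧ g i < ls.2 then (some i, g i) else ls)
        ((none : Option String), B)).1
      = some (t.foldl (selStep f g) h) := by
  have hM1 : ∀ x ∈ h :: t, f x ≤ highest := by
    intro x hx
    exact PySem.List.max?_isMax hmax (f x) (List.mem_map_of_mem hx)
  obtain ⟨x0, hx0mem, hx0⟩ : ∃ x0 ∈ h :: t, f x0 = highest := by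
    have := PySem.List.max?_mem hmax
    rcases List.mem_map.mp this with ⟨x0, hm, he⟩
    exact ⟨x0, hm, he⟩
  have hfinal : f (t.foldl (selStep f g) h) = highest := by
    apply le_antisymm
    · exact hM1 _ (selStep_mem f g t h)
    · calc highest = f x0 := hx0.symm
        _ ≤ _ := selStep_isMax f g t h x0 hx0mem
  simp only [List.foldl_cons]
  by_cases hfh : f h = highest
  · rw [if_pos ⟨hfh, hgb h⟩]
    rw [sel_inv f g highest B t h (some h) (g h)
      (fun x hx => ⟨hM1 x (by simp [hx]), hgb x⟩) (le_of_eq hfh)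
      (fun _ => ⟨rfl, rfl⟩) (fun hc => absurd hfh hc)]
    rw [if_pos hfinal]
  · rw [if_neg (by rintro ⟨hc, _⟩; exact hfh hc)]
    rw [sel_inv f g highest B t h none B
      (fun x hx => ⟨hM1 x (by simp [hx]), hgb x⟩) (hM1 h (by simp))
      (fun hc => absurd hc hfh) (fun _ => ⟨rfl, rfl⟩)]
    rw [if_pos hfinal]

theorem sorted2_eq_foldl (xs : List String) (k1 k2 : String → Int) :
    PySem.List.sorted2 xs k1 k2
      = xs.foldl (fun acc x => PySem.List.insertBy
          (fun a b => decide (k1 a < k1 b) || (!decide (k1 b < k1 a) && decide (k2 a < k2 b)))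
          x acc) [] := rfl

theorem foldl_insertBy_cons (before : String → String → Bool) (h : String) (t : List String) :
    (h :: t).foldl (fun acc x => PySem.List.insertBy before x acc) []
      = t.foldl (fun acc x => PySem.List.insertBy before x acc) [h] := by
  simp only [List.foldl_cons]
  rfl

theorem pyGet?_zero_head? (l : List String) : PySem.List.pyGet? l 0 = l.head? := by
  cases l with
  | nil => rfl
  | cons x xs => simp [PySem.List.pyGet?, PySem.List.pyIdx?]

-- ===== VERDICT =====
theorem find_most_alike_spec : Claim_equal_find_most_alike := by
  intro d val hDom hPre
  unfold Spec_find_most_alike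
  obtain ⟨hvmem, hlen⟩ := hPre
  have hndk : (PySem.Dict.ofList d).keys.Nodup := PySem.Dict.nodup_keys_ofList d
  have hvalk : val ∈ (PySem.Dict.ofList d).keys := by
    rw [keys_ofList_eq]; exact (PySem.Set.mem_ofList _ val).mpr hvmem
  have hrem : PySem.List.remove? (PySem.Dict.ofList d).keys val
      = some ((PySem.Dict.ofList d).keys.erase val) :=
    PySem.List.remove?_eq_some_erase _ val hvalk
  have hndtp : ((PySem.Dict.ofList d).keys.erase val).Nodup := hndk.erase val
  have hvaltp : val ∉ (PySem.Dict.ofList d).keys.erase val := hndk.not_mem_erase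
  have htpfil : (PySem.Dict.ofList d).keys.filter (fun x => x != val)
      = (PySem.Dict.ofList d).keys.erase val := (List.Nodup.erase_eq_filter hndk val).symm
  have hgb : ∀ x : String, (PySem.Dict.ofList d).getD x 0 < 99999999999999999999999999 := by
    intro x
    apply getD_ofList_bound
    intro p hp
    unfold Dom_find_most_alike at hDom
    simp only [Bool.and_eq_true, List.all_eq_true] at hDom
    exact (hDom.1 p hp).2
  -- the zero-initialised dict both programs start from
  have hkeys0 : (((PySem.Dict.ofList d).keys.erase val).foldl
      (fun r x => r.insert x (0 : Int)) (PySem.Dict.empty : PySem.Dict String Int)).keys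
      = (PySem.Dict.ofList d).keys.erase val := by
    have h : (((PySem.Dict.ofList d).keys.erase val).foldl
        (fun r x => r.insert x (0 : Int)) (PySem.Dict.empty : PySem.Dict String Int)).keys
        = PySem.Set.update (PySem.Dict.empty : PySem.Dict String Int).keys
            ((PySem.Dict.ofList d).keys.erase val) :=
      PySem.Dict.keys_foldl_insert _ (fun _ _ => (0 : Int)) _
    rw [h, PySem.Dict.keys_empty, PySem.Set.update_nil_left,
      PySem.Set.ofList_eq_self_of_nodup _ hndtp]
  -- A's counted dict
  have hkeysres : ((((PySem.Dict.ofList d).keys.erase val)).foldl (fun r t =>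
      if val == t then r
      else (PySem.List.pyRange 0 (PySem.Str.len val) 1).foldl (fun r i =>
        match PySem.Str.pyGet? val i, PySem.Str.pyGet? t i with
        | some a, some b => if a == b then r.modify t 0 (· + 1) else r
        | _, _ => r) r)
      (((PySem.Dict.ofList d).keys.erase val).foldl (fun r x => r.insert x (0 : Int))
        (PySem.Dict.empty : PySem.Dict String Int))).keys
      = (PySem.Dict.ofList d).keys.erase val := by
    rw [keys_outer val _ _ (fun t ht => by rw [hkeys0]; exact ht), hkeys0]
  have hgetD : ∀ k ∈ (PySem.Dict.ofList d).keys.erase val,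
      ((((PySem.Dict.ofList d).keys.erase val)).foldl (fun r t =>
        if val == t then r
        else (PySem.List.pyRange 0 (PySem.Str.len val) 1).foldl (fun r i =>
          match PySem.Str.pyGet? val i, PySem.Str.pyGet? t i with
          | some a, some b => if a == b then r.modify t 0 (· + 1) else r
          | _, _ => r) r)
        (((PySem.Dict.ofList d).keys.erase val).foldl (fun r x => r.insert x (0 : Int))
          (PySem.Dict.empty : PySem.Dict String Int))).getD k 0
      = mcount val k := by
    intro k hk
    rw [getD_outer val _ hndtp hvaltp _ k, getD_init, if_pos hk, if_pos hk, zero_add]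
  have hvals : ((((PySem.Dict.ofList d).keys.erase val)).foldl (fun r t =>
      if val == t then r
      else (PySem.List.pyRange 0 (PySem.Str.len val) 1).foldl (fun r i =>
        match PySem.Str.pyGet? val i, PySem.Str.pyGet? t i with
        | some a, some b => if a == b then r.modify t 0 (· + 1) else r
        | _, _ => r) r)
      (((PySem.Dict.ofList d).keys.erase val).foldl (fun r x => r.insert x (0 : Int))
        (PySem.Dict.empty : PySem.Dict String Int))).values
      = ((PySem.Dict.ofList d).keys.erase val).map (fun k => mcount val k) := by
    rw [PySem.Dict.values_eq_map_keys _ (by rw [hkeysres]; exact hndtp) 0, hkeysres]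
    exact List.map_congr_left (fun k hk => hgetD k hk)
  -- B's column-counted dict
  have hcol := colLoop_spec val (PySem.List.pyRange 0 (PySem.Str.len val) 1)
    (fun i hi => (PySem.List.mem_pyRange_one).mp hi)
    (((PySem.Dict.ofList d).keys.erase val).foldl (fun r x => r.insert x (0 : Int))
      (PySem.Dict.empty : PySem.Dict String Int))
    (by rw [hkeys0]; exact hndtp)
  obtain ⟨hkeysB, hgetDB⟩ := hcol
  rw [hkeys0] at hkeysB hgetDB
  have hcntB : ∀ k ∈ (PySem.Dict.ofList d).keys.erase val,
      ((PySem.List.pyRange 0 (PySem.Str.len val) 1).foldl (fun c i =>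
          match PySem.Str.pyGet? val i with
          | none => c
          | some ch => c.keys.foldl (fun c' t =>
              match PySem.Str.pyGet? t i with
              | none => c'
              | some a => if a == ch then c'.modify t 0 (· + 1) else c') c)
        (((PySem.Dict.ofList d).keys.erase val).foldl (fun r x => r.insert x (0 : Int))
          (PySem.Dict.empty : PySem.Dict String Int))).getD k 0 = mcount val k := by
    intro k hk
    rw [hgetDB k, getD_init, if_pos hk, if_pos hk, zero_add]
    rfl
  -- unfold both ports
  simp only [find_most_alike, find_most_alike_alt]
  rw [hrem, htpfil]
  simp only [hvals, hkeysres, hkeysB]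
  cases htp : (PySem.Dict.ofList d).keys.erase val with
  | nil =>
    rw [htp] at hkeys0
    simp only [hkeys0, List.map_nil, List.isEmpty_nil, if_true]
    rfl
  | cons h t =>
    rw [htp] at hkeys0 hkeysB hcntB hgetD
    simp only [hkeys0, List.isEmpty_cons, if_false, Bool.false_eq_true]
    cases hmx : PySem.List.max? ((h :: t).map (fun k => mcount val k)) (fun v => v) with
    | none =>
      exfalso
      have := (PySem.List.max?_eq_none_iff _ _).mp hmx
      simp at this
    | some highest =>
      -- A's selection scan, with getD rewritten to mcount on the keys
      have hcg : List.foldl (fun ls i =>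
          if ((h :: t).foldl (fun r t' =>
          if val == t' then r
          else (PySem.List.pyRange 0 (PySem.Str.len val) 1).foldl (fun r i =>
            match PySem.Str.pyGet? val i, PySem.Str.pyGet? t' i with
            | some a, some b => if a == b then r.modify t' 0 (· + 1) else r
            | _, _ => r) r)
          ((h :: t).foldl (fun r x => r.insert x (0 : Int))
            (PySem.Dict.empty : PySem.Dict String Int))).getD i 0 = highest
            ∧ (PySem.Dict.ofList d).getD i 0 < ls.2
          then (some i, (PySem.Dict.ofList d).getD i 0) else ls)
          ((none : Option String), (99999999999999999999999999 : Int)) (h :: t)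
        = List.foldl (fun ls i =>
          if mcount val i = highest ∧ (PySem.Dict.ofList d).getD i 0 < ls.2
          then (some i, (PySem.Dict.ofList d).getD i 0) else ls)
          ((none : Option String), (99999999999999999999999999 : Int)) (h :: t) :=
        PySem.List.foldl_congr_mem _ _ _ _ (fun acc x hx => by rw [hgetD x hx])
      have hAside := final_step h t (fun k => mcount val k) (fun x => (PySem.Dict.ofList d).getD x 0)
        99999999999999999999999999 highest hgb hmx
      -- B's sorted2 head is the same selection fold
      rw [pyGet?_zero_head?, sorted2_eq_foldl, foldl_insertBy_cons, head?_foldl_insertBy]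
      refine (congrArg Prod.fst hcg).trans (hAside.trans (congrArg some ?_))
      exact (pickFold_eq_selStep (fun k => mcount val k)
          (fun x => (PySem.Dict.ofList d).getD x 0) t h).symm.trans
        (pickFold_congr
          (fun a b => decide (-(mcount val a) < -(mcount val b))
            || (!decide (-(mcount val b) < -(mcount val a))
                && decide ((PySem.Dict.ofList d).getD a 0 < (PySem.Dict.ofList d).getD b 0)))
          _ (h :: t)
          (fun a ha b hb => by beta_reduce; rw [hcntB a ha, hcntB b hb])
          t (fun x hx => by simp [hx]) h (by simp))
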